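-- pv_equiv track=rewrite | github.com/nagyf/advent-of-code-2019 | src/004.py | has_duplicate_digit
-- ===== SOURCE A (Python) =====
-- def has_duplicate_digit(password):
--     str_pass = str(password)
--     for i in range(0,10):
--         double = '%d%d' % (i, i)
--         triple = '%d%d%d' % (i, i, i)
--
--         # Has double but doesn't have triple of the same digit
--         if str_pass.find(double) != -1 and str_pass.find(triple) == -1:
--             return True
--
--     return False
-- ===== SOURCE B (Python) =====
-- def has_duplicate_digit(password):
--     s = str(password)
--     doubles = {a for a, b in zip(s, s[1:]) if a == b and a in '0123456789'}
--     triples = {a for a, b, c in zip(s, s[1:], s[2:]) if a == b == c}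
--     return bool(doubles - triples)
-- ===== Notes on version B (the rewrite author's own statement) =====
-- stated objective: alternative
-- what changed: Instead of looping over the ten digits and running two substring searches ('dd' present, 'ddd' absent) per digit, B makes one adjacent-pair and one adjacent-triple scan of str(password) via zip, collects the doubled digits and the tripled characters into two sets, and returns whether their set difference is nonempty.
import Mathlib
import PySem

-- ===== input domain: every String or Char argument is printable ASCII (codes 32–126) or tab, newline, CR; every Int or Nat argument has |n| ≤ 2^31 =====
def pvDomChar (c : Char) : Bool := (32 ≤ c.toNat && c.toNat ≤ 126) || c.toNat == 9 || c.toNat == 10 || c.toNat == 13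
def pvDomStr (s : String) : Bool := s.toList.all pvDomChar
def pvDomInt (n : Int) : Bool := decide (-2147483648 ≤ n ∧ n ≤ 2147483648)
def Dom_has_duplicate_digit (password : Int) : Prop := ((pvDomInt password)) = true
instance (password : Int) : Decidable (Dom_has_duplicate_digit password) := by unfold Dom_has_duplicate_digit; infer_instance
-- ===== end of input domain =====

-- B re-implements the per-digit substring search as one adjacent-pair/triple scan of str(password)
-- collected into two sets (objective: alternative decomposition, similar cost).

-- ===== PORT A =====
-- loop 'for i in range(0,10): … return True' with early exit
def hddLoop (s : List Char) : List Int → Bool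
  | [] => false
  | i :: rest =>
    let d := PySem.Int.toChars i
    let dbl := d ++ d
    let tri := d ++ d ++ d
    if PySem.Chars.find s dbl != -1 && PySem.Chars.find s tri == -1 then true
    else hddLoop s rest

def has_duplicate_digit (password : Int) : Bool :=
  hddLoop (PySem.Int.toChars password) (PySem.List.pyRange 0 10 1)

-- ===== PORT B =====
def hddDigits : List Char := ['0','1','2','3','4','5','6','7','8','9']

def has_duplicate_digit_alt (password : Int) : Bool :=
  let s := PySem.Int.toChars password
  let doubles : PySem.Set Char := PySem.Set.ofList
    (((s.zip (s.drop 1)).filter (fun p => p.1 == p.2 && hddDigits.contains p.1)).map Prod.fst)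
  let triples : PySem.Set Char := PySem.Set.ofList
    ((((s.zip (s.drop 1)).zip (s.drop 2)).filter
        (fun t => t.1.1 == t.1.2 && t.1.2 == t.2)).map (fun t => t.1.1))
  PySem.Set.len (PySem.Set.diff doubles triples) != 0

-- ===== PRECONDITION & SPEC =====
def Spec_has_duplicate_digit (password : Int) (out : Bool) : Prop := out = has_duplicate_digit_alt password
instance (password : Int) (out : Bool) : Decidable (Spec_has_duplicate_digit password out) := by unfold Spec_has_duplicate_digit; infer_instance

-- ===== CLAIM (what is proved, stated in full; the proofs are below) =====
def Claim_equal_has_duplicate_digit : Prop := ∀ (password : Int), Dom_has_duplicate_digit password → Spec_has_duplicate_digit password (has_duplicate_digit password)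

-- ===== LEMMAS AND PROOFS =====

-- an adjacent equal pair is exactly a two-character run
theorem hdd_pair_mem (s : List Char) (c : Char) :
    (c, c) ∈ s.zip (s.drop 1) ↔ [c, c] <:+: s := by
  induction s with
  | nil => simp
  | cons a t ih =>
    cases t with
    | nil =>
      simp only [List.drop_succ_cons, List.drop_zero, List.zip_nil_right, List.not_mem_nil,
        false_iff]
      intro h
      have := h.length_le
      simp at this
    | cons b u =>
      simp only [List.drop_succ_cons, List.drop_zero, List.zip_cons_cons, List.mem_cons,
        List.infix_cons_iff, List.cons_prefix_cons, Prod.mk.injEq, List.nil_prefix,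
        and_true] at *
      tauto

-- an adjacent equal triple is exactly a three-character run
theorem hdd_triple_mem (s : List Char) (c : Char) :
    ((c, c), c) ∈ (s.zip (s.drop 1)).zip (s.drop 2) ↔ [c, c, c] <:+: s := by
  induction s with
  | nil => simp
  | cons a t ih =>
    cases t with
    | nil =>
      simp only [List.drop_succ_cons, List.drop_zero, List.zip_nil_right, List.zip_nil_left,
        List.not_mem_nil, false_iff]
      intro h
      have := h.length_le
      simp at this
    | cons b u =>
      cases u with
      | nil =>
        simp only [List.drop_succ_cons, List.drop_zero, List.zip_cons_cons, List.zip_nil_right,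
          List.not_mem_nil, false_iff]
        intro h
        have := h.length_le
        simp at this
      | cons d v =>
        simp only [List.drop_succ_cons, List.drop_zero, List.zip_cons_cons, List.mem_cons,
          List.infix_cons_iff, List.cons_prefix_cons, Prod.mk.injEq, List.nil_prefix,
          and_true] at *
        tauto

-- A's loop is an 'any' over the remaining digits
theorem hddLoop_eq_any (s : List Char) (l : List Int) :
    hddLoop s l = l.any (fun i =>
      decide ((PySem.Int.toChars i ++ PySem.Int.toChars i) <:+: s ∧
        ¬ (PySem.Int.toChars i ++ PySem.Int.toChars i ++ PySem.Int.toChars i) <:+: s)) := by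
  induction l with
  | nil => rfl
  | cons i rest ih =>
    simp only [hddLoop, List.any_cons, ← ih]
    by_cases h1 : (PySem.Int.toChars i ++ PySem.Int.toChars i) <:+: s <;>
      by_cases h2 : (PySem.Int.toChars i ++ PySem.Int.toChars i ++ PySem.Int.toChars i) <:+: s <;>
        simp [hddLoop, h1, h2, PySem.Chars.find_ne_neg_one_iff, PySem.Chars.find_eq_neg_one_iff,
          bne_iff_ne, beq_iff_eq]

-- membership in B's 'doubles' set
theorem hdd_mem_doubles (s : List Char) (c : Char) :
    c ∈ PySem.Set.ofList
        (((s.zip (s.drop 1)).filter (fun p => p.1 == p.2 && hddDigits.contains p.1)).map Prod.fst)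
      ↔ (c, c) ∈ s.zip (s.drop 1) ∧ c ∈ hddDigits := by
  simp only [PySem.Set.mem_ofList, List.mem_map, List.mem_filter]
  constructor
  · rintro ⟨⟨x, y⟩, ⟨hm, hf⟩, rfl⟩
    simp only [beq_iff_eq, Bool.and_eq_true, List.contains_eq_mem, decide_eq_true_eq] at hf
    exact ⟨hf.1 ▸ hm, hf.2⟩
  · rintro ⟨hm, hd⟩
    exact ⟨(c, c), ⟨hm, by simp [hd]⟩, rfl⟩

-- membership in B's 'triples' set
theorem hdd_mem_triples (s : List Char) (c : Char) :
    c ∈ PySem.Set.ofList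
        ((((s.zip (s.drop 1)).zip (s.drop 2)).filter
            (fun t => t.1.1 == t.1.2 && t.1.2 == t.2)).map (fun t => t.1.1))
      ↔ ((c, c), c) ∈ (s.zip (s.drop 1)).zip (s.drop 2) := by
  simp only [PySem.Set.mem_ofList, List.mem_map, List.mem_filter]
  constructor
  · rintro ⟨⟨⟨x, y⟩, z⟩, ⟨hm, hf⟩, rfl⟩
    simp only [beq_iff_eq, Bool.and_eq_true] at hf
    obtain ⟨rfl, rfl⟩ := hf
    exact hm
  · intro hm
    exact ⟨((c, c), c), ⟨hm, by simp⟩, rfl⟩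

-- nonempty set difference, as used by B's final 'bool(doubles - triples)'
theorem hdd_set_nonempty {α : Type} [BEq α] [LawfulBEq α] (D T : PySem.Set α) :
    (PySem.Set.len (PySem.Set.diff D T) != 0) = true ↔ ∃ c ∈ D, ¬ c ∈ T := by
  rw [bne_iff_ne]
  unfold PySem.Set.len PySem.Set.diff
  rw [ne_eq, Int.natCast_eq_zero, List.length_eq_zero_iff, ← ne_eq,
    ← List.isEmpty_eq_false_iff, List.isEmpty_eq_false_iff_exists_mem]
  simp [PySem.Set.contains]

-- B returns true iff some digit has a double run but no triple run
theorem hdd_alt_iff (password : Int) :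
    has_duplicate_digit_alt password = true ↔
      ∃ c ∈ hddDigits, ([c, c] <:+: PySem.Int.toChars password ∧
        ¬ [c, c, c] <:+: PySem.Int.toChars password) := by
  unfold has_duplicate_digit_alt
  rw [hdd_set_nonempty]
  constructor
  · rintro ⟨c, h1, h2⟩
    have hd := (hdd_mem_doubles _ c).mp h1
    exact ⟨c, hd.2, (hdd_pair_mem _ c).mp hd.1,
      fun h => h2 ((hdd_mem_triples _ c).mpr ((hdd_triple_mem _ c).mpr h))⟩
  · rintro ⟨c, hcd, hp, ht⟩
    exact ⟨c, (hdd_mem_doubles _ c).mpr ⟨(hdd_pair_mem _ c).mpr hp, hcd⟩,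
      fun hm => ht ((hdd_triple_mem _ c).mp ((hdd_mem_triples _ c).mp hm))⟩

-- ===== VERDICT (by name: the statement is the Claim_ definition above) =====
theorem has_duplicate_digit_spec : Claim_equal_has_duplicate_digit := by
  intro password _
  show has_duplicate_digit password = has_duplicate_digit_alt password
  rw [Bool.eq_iff_iff]
  rw [hdd_alt_iff]
  unfold has_duplicate_digit
  rw [hddLoop_eq_any]
  rw [show PySem.List.pyRange 0 10 1 = [0,1,2,3,4,5,6,7,8,9] from by decide]
  set s := PySem.Int.toChars password
  simp only [List.any_cons, List.any_nil, Bool.or_eq_true, decide_eq_true_eq, Bool.false_eq_true,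
    or_false]
  rw [show (PySem.Int.toChars 0) = ['0'] from rfl, show (PySem.Int.toChars 1) = ['1'] from rfl,
    show (PySem.Int.toChars 2) = ['2'] from rfl, show (PySem.Int.toChars 3) = ['3'] from rfl,
    show (PySem.Int.toChars 4) = ['4'] from rfl, show (PySem.Int.toChars 5) = ['5'] from rfl,
    show (PySem.Int.toChars 6) = ['6'] from rfl, show (PySem.Int.toChars 7) = ['7'] from rfl,
    show (PySem.Int.toChars 8) = ['8'] from rfl, show (PySem.Int.toChars 9) = ['9'] from rfl]
  simp only [hddDigits, List.mem_cons, List.not_mem_nil, or_false, exists_eq_or_imp,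
    exists_eq_left, List.cons_append, List.nil_append]
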